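-- pv_equiv track=rewrite | github.com/ywzeng/code_exercise | interaction_info_experiment.py | extract_onclick_urls
-- ===== SOURCE A (Python) =====
-- def extract_onclick_urls(onclick_html) -> list:
--     """
--     If there are plain URLs in the 'onclick' JS code, we extract them.
--     Otherwise, we deem them all as function call.
--     :param onclick_html: HTMl code of the 'onclick' attribute.
--     :return: URL list
--     """
--     if len(onclick_html) == 0:
--         return []
--     # Extract the plain URl in the 'onclick' attribute. The JS code may contain more than one quotation-pair.
--     url_list = []
--     left = 0
--     while left < len(onclick_html):
--         while left < len(onclick_html) and onclick_html[left] not in ('"', "'"):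
--             left += 1
--         if left >= len(onclick_html):
--             break
--         quotation = onclick_html[left]
--         right = left + 1
--         while right < len(onclick_html) and onclick_html[right] != quotation:
--             right += 1
--         temp_url = onclick_html[left+1: right]
--         if '/' in temp_url or '%2f' in temp_url or '%2F' in temp_url:
--             url_list += [temp_url]
--         left = right + 1
--     return url_list
-- ===== SOURCE B (Python) =====
-- def extract_onclick_urls(onclick_html) -> list:
--     """Single-pass state-machine scanner: track the open quote and accumulate
--     the quoted text char by char instead of pointer-walking with indices."""
--     urls = []
--     quote = None
--     buf = []
--     for ch in onclick_html:
--         if quote is None: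
--             if ch in ('"', "'"):
--                 quote = ch
--                 buf = []
--         elif ch == quote:
--             s = ''.join(buf)
--             if '/' in s or '%2f' in s or '%2F' in s:
--                 urls.append(s)
--             quote = None
--         else:
--             buf.append(ch)
--     if quote is not None:
--         s = ''.join(buf)
--         if '/' in s or '%2f' in s or '%2F' in s:
--             urls.append(s)
--     return urls
-- ===== Notes on version B (the rewrite author's own statement) =====
-- stated objective: idiomatic
-- what changed: Replaced A's index-based tokenizer (outer while over positions with two inner pointer-advancing while loops and slicing) by a single forward pass over the characters with an explicit scanner state (open-quote char + accumulated buffer), flushing an unterminated quote at the end.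
import Mathlib
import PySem

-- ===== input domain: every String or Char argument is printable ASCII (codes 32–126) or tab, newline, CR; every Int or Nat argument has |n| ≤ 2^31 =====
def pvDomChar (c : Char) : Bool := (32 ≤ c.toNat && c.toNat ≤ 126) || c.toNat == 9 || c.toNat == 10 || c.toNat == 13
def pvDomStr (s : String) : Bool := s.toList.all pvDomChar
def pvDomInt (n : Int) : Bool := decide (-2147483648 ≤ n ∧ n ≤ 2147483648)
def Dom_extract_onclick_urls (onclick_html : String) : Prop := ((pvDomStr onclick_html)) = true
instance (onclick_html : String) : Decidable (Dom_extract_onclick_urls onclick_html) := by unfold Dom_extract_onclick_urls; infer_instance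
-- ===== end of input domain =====

-- B replaces A's index-walking two-level while-loop tokenizer by a single left fold
-- with an explicit scanner state (current open quote + accumulated buffer); objective: idiomatic (measured constant-factor faster).

-- shared predicate: "'/' in u or '%2f' in u or '%2F' in u"
def pvIsUrl (u : List Char) : Bool :=
  PySem.Chars.isIn ['/'] u || PySem.Chars.isIn ['%','2','f'] u || PySem.Chars.isIn ['%','2','F'] u

-- ===== PORT A =====
-- inner while loop 1: advance left until a quote character or the end
def pvSkipQ (s : List Char) (left : Nat) : Nat :=
  if h : left < s.length then
    if s[left] == '"' || s[left] == '\'' then left else pvSkipQ s (left + 1)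
  else left
termination_by s.length - left

-- inner while loop 2: advance right until the matching quotation or the end
def pvFindClose (s : List Char) (q : Char) (right : Nat) : Nat :=
  if h : right < s.length then
    if s[right] == q then right else pvFindClose s q (right + 1)
  else right
termination_by s.length - right

theorem pvSkipQ_le (s : List Char) (left : Nat) : left ≤ pvSkipQ s left := by
  unfold pvSkipQ
  split
  · split
    · exact le_refl _
    · exact Nat.le_trans (Nat.le_succ _) (pvSkipQ_le s (left + 1))
  · exact le_refl _
termination_by s.length - left

theorem pvFindClose_le (s : List Char) (q : Char) (right : Nat) : right ≤ pvFindClose s q right := by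
  unfold pvFindClose
  split
  · split
    · exact le_refl _
    · exact Nat.le_trans (Nat.le_succ _) (pvFindClose_le s q (right + 1))
  · exact le_refl _
termination_by s.length - right

-- outer while loop of A
def pvOuter (s : List Char) (left : Nat) (url_list : List String) : List String :=
  if _h : left < s.length then
    let l := pvSkipQ s left
    if hl : s.length ≤ l then url_list
    else
      let quotation := s.getD l ' '
      let r := pvFindClose s quotation (l + 1)
      let temp_url := PySem.List.slice s (some ((l + 1 : Nat) : Int)) (some ((r : Nat) : Int))
      let url_list' := if pvIsUrl temp_url then url_list ++ [String.ofList temp_url] else url_list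
      pvOuter s (r + 1) url_list'
  else url_list
termination_by s.length - left
decreasing_by
  have h1 := pvSkipQ_le s left
  have h2 := pvFindClose_le s (s.getD (pvSkipQ s left) ' ') (pvSkipQ s left + 1)
  omega

def extract_onclick_urls (onclick_html : String) : List String :=
  if PySem.Str.len onclick_html = 0 then []
  else pvOuter onclick_html.toList 0 []

-- ===== PORT B =====
-- scanner state: (urls so far, currently open quote (if any), buffered quoted chars)
def pvStep (st : List String × Option Char × List Char) (c : Char) :
    List String × Option Char × List Char :=
  match st with
  | (urls, none, buf) =>
      if c == '"' || c == '\'' then (urls, some c, []) else (urls, none, buf)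
  | (urls, some q, buf) =>
      if c == q then
        ((if pvIsUrl buf then urls ++ [String.ofList buf] else urls), none, buf)
      else (urls, some q, buf ++ [c])

-- final flush of an unterminated quote
def pvFlush (st : List String × Option Char × List Char) : List String :=
  match st with
  | (urls, none, _) => urls
  | (urls, some _, buf) => if pvIsUrl buf then urls ++ [String.ofList buf] else urls

def extract_onclick_urls_alt (onclick_html : String) : List String :=
  pvFlush (onclick_html.toList.foldl pvStep ([], none, []))

-- ===== PRECONDITION & SPEC =====
def Spec_extract_onclick_urls (onclick_html : String) (out : List String) : Prop := out = extract_onclick_urls_alt onclick_html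
instance (onclick_html : String) (out : List String) : Decidable (Spec_extract_onclick_urls onclick_html out) := by unfold Spec_extract_onclick_urls; infer_instance

-- ===== CLAIM (what is proved, stated in full; the proofs are below) =====
def Claim_equal_extract_onclick_urls : Prop := ∀ (onclick_html : String), Dom_extract_onclick_urls onclick_html → Spec_extract_onclick_urls onclick_html (extract_onclick_urls onclick_html)

-- ===== LEMMAS AND PROOFS =====

-- pvSkipQ stops at a quote (or the end), and everything it skipped leaves the
-- outside-of-quote state of pvStep unchanged.
theorem pvSkipQ_fold (s : List Char) (left : Nat) (urls : List String) (buf : List Char) :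
    (s.drop left).foldl pvStep (urls, none, buf) =
      (s.drop (pvSkipQ s left)).foldl pvStep (urls, none, buf) := by
  unfold pvSkipQ
  split
  · rename_i h
    split
    · rfl
    · rename_i hq
      rw [List.drop_eq_getElem_cons h]
      have hstep : pvStep (urls, none, buf) s[left] = (urls, none, buf) := by
        simp [pvStep, hq]
      simp only [List.foldl_cons, hstep]
      exact pvSkipQ_fold s (left + 1) urls buf
  · rfl
termination_by s.length - left

theorem pvSkipQ_quote (s : List Char) (left : Nat) (h : pvSkipQ s left < s.length) :
    s[pvSkipQ s left] == '"' || s[pvSkipQ s left] == '\'' := by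
  unfold pvSkipQ at *
  split at h
  · split at h
    · rename_i h1 hq
      simp only [dif_pos h1, if_pos hq]
      exact hq
    · rename_i h1 hq
      simp only [dif_pos h1, if_neg hq]
      exact pvSkipQ_quote s (left + 1) h
  · omega
termination_by s.length - left

-- folding pvStep from inside a quote up to pvFindClose
theorem pvFindClose_fold (s : List Char) (q : Char) (start : Nat) (urls : List String)
    (buf : List Char) :
    (s.drop start).foldl pvStep (urls, some q, buf) =
      if pvFindClose s q start < s.length then
        (s.drop (pvFindClose s q start + 1)).foldl pvStep
          ((if pvIsUrl (buf ++ (s.drop start).take (pvFindClose s q start - start)) then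
              urls ++ [String.ofList (buf ++ (s.drop start).take (pvFindClose s q start - start))]
            else urls), none, buf ++ (s.drop start).take (pvFindClose s q start - start))
      else (urls, some q, buf ++ (s.drop start).take (pvFindClose s q start - start)) := by
  unfold pvFindClose
  split
  · rename_i h
    split
    · rename_i hq
      rw [List.drop_eq_getElem_cons h]
      have hstep : pvStep (urls, some q, buf) s[start] =
          ((if pvIsUrl buf then urls ++ [String.ofList buf] else urls), none, buf) := by
        simp [pvStep, hq]
      simp only [List.foldl_cons, hstep]
      simp
    · rename_i hq
      rw [List.drop_eq_getElem_cons h]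
      have hstep : pvStep (urls, some q, buf) s[start] = (urls, some q, buf ++ [s[start]]) := by
        simp [pvStep, hq]
      simp only [List.foldl_cons, hstep]
      rw [pvFindClose_fold s q (start + 1) urls (buf ++ [s[start]])]
      have htake : (buf ++ [s[start]]) ++ (s.drop (start + 1)).take (pvFindClose s q (start + 1) - (start + 1)) =
          buf ++ (s[start] :: s.drop (start + 1)).take (pvFindClose s q (start + 1) - start) := by
        have hle := pvFindClose_le s q (start + 1)
        have h2 : pvFindClose s q (start + 1) - start = (pvFindClose s q (start + 1) - (start + 1)) + 1 := by omega
        rw [h2, List.take_succ_cons, List.append_assoc, List.singleton_append]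
      rw [htake]
  · rename_i h
    rw [List.drop_eq_nil_of_le (by omega : s.length ≤ start)]
    simp
termination_by s.length - start

-- the main invariant: A's outer loop equals flushing B's fold over the suffix
theorem pvMain (s : List Char) (left : Nat) (urls : List String) (buf : List Char) :
    pvOuter s left urls = pvFlush ((s.drop left).foldl pvStep (urls, none, buf)) := by
  unfold pvOuter
  split
  · rename_i h
    rw [pvSkipQ_fold s left urls buf]
    by_cases hl : s.length ≤ pvSkipQ s left
    · rw [dif_pos hl]
      rw [List.drop_eq_nil_of_le hl]
      rfl
    · rw [dif_neg hl]
      have hlen : pvSkipQ s left < s.length := by omega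
      set l := pvSkipQ s left with hldef
      have hq := pvSkipQ_quote s left hlen
      rw [List.drop_eq_getElem_cons hlen]
      have hgetD : s.getD l ' ' = s[l] := List.getD_eq_getElem s ' ' hlen
      have hstep : pvStep (urls, none, buf) s[l] = (urls, some s[l], []) := by
        simp only [pvStep]
        rw [if_pos hq]
      simp only [List.foldl_cons, hstep]
      rw [pvFindClose_fold s s[l] (l + 1) urls []]
      simp only [List.nil_append, hgetD]
      have hslice : PySem.List.slice s (some ((l + 1 : Nat) : Int)) (some ((pvFindClose s s[l] (l+1) : Nat) : Int)) =
          (s.drop (l + 1)).take (pvFindClose s s[l] (l+1) - (l + 1)) :=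
        PySem.List.slice_natCast s (l+1) _
      rw [hslice]
      set r := pvFindClose s s[l] (l + 1) with hrdef
      set seg := (s.drop (l + 1)).take (r - (l + 1)) with hsegdef
      by_cases hr : r < s.length
      · rw [if_pos hr]
        exact pvMain s (r + 1) (if pvIsUrl seg then urls ++ [String.ofList seg] else urls) seg
      · rw [if_neg hr]
        have : s.length ≤ r + 1 := by omega
        rw [pvMain s (r + 1) (if pvIsUrl seg then urls ++ [String.ofList seg] else urls) seg]
        rw [List.drop_eq_nil_of_le (by omega : s.length ≤ r + 1), List.foldl_nil]
        rfl
  · rename_i h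
    rw [List.drop_eq_nil_of_le (by omega : s.length ≤ left), List.foldl_nil]
    rfl
termination_by s.length - left
decreasing_by
  · have h1 := pvSkipQ_le s left
    have h2 := pvFindClose_le s s[pvSkipQ s left] (pvSkipQ s left + 1)
    omega
  · have h1 := pvSkipQ_le s left
    have h2 := pvFindClose_le s s[pvSkipQ s left] (pvSkipQ s left + 1)
    omega

-- ===== VERDICT (by name: the statement is the Claim_ definition above) =====
theorem extract_onclick_urls_spec : Claim_equal_extract_onclick_urls := by
  intro onclick_html _
  unfold Spec_extract_onclick_urls extract_onclick_urls extract_onclick_urls_alt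
  split
  · rename_i h
    have : onclick_html.toList = [] := by
      have := PySem.Str.len_eq onclick_html
      have : onclick_html.toList.length = 0 := by omega
      exact List.length_eq_zero_iff.mp this
    rw [this]
    rfl
  · rw [pvMain onclick_html.toList 0 [] [], List.drop_zero]
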